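-- pv_equiv track=rewrite | github.com/tinabuzanis/advent-of-code | 2021/day16.py | decode_literal
-- ===== SOURCE A (Python) =====
-- def decode_literal(bits):
--     acc = ''
--     i = 0
--     while 1:
--         acc += bits[i+1:i+5]
--         if bits[i] == '0':
--             break
--         i += 5
--     return i+5, int(acc, 2)
-- ===== SOURCE B (Python) =====
-- def decode_literal(bits):
--     # pass 1: scan only leader bits to find the terminating group
--     j = 0
--     while bits[j] == '1':
--         j += 5
--     # pass 2: assemble the payload from the groups 0, 5, ..., j
--     acc = ''.join(bits[k + 1:k + 5] for k in range(0, j + 1, 5))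
--     return j + 5, int(acc, 2)
-- ===== Notes on version B (the rewrite author's own statement) =====
-- stated objective: alternative
-- what changed: Replaces A's single fused loop (accumulating payload bits while scanning) with two separate passes: a leader-only scan that finds the terminating group index j, then a join-comprehension over range(0, j+1, 5) that assembles the payload, parsed once at the end.
-- outside the precondition, e.g. on decode_literal('x101000101'): A returns (10, 165), B returns (5, 10); on decode_literal('0'): A raises ValueError, B raises ValueError; on decode_literal('1'): A raises IndexError, B raises IndexError
import Mathlib
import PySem

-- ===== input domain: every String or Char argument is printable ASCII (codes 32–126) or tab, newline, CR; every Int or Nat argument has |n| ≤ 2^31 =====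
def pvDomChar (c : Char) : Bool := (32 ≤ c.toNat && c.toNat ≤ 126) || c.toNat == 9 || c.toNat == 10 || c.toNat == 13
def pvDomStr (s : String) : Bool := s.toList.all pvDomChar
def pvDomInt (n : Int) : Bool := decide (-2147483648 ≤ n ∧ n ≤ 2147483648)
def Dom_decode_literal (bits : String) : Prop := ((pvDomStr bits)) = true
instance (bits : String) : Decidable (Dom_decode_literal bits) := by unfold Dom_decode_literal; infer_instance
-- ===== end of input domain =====

-- B separates finding the terminating group from assembling the payload (two passes instead of A's fused loop); same cost, proved equal on binary inputs where A returns.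


-- ===== PORT A =====
-- int(acc, 2) on a non-empty all-'0'/'1' string (guaranteed by Pre_): exact there.
def pvBinVal (cs : List Char) : Int :=
  cs.foldl (fun a c => a * 2 + (if c = '1' then 1 else 0)) 0

-- A's while-loop: state (acc, i); bits[i+1:i+5] = (drop (i+1)).take 4 (nonneg in-order slice,
-- exact); bits[i] out of range = IndexError, excluded by Pre_ (junk value (0, 0) there).
def decodeA_go (bits : List Char) (acc : List Char) (i : Nat) : Int × Int :=
  let acc' := acc ++ (bits.drop (i + 1)).take 4
  match h : bits[i]? with
  | none => (0, 0)
  | some c =>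
    if c = '0' then ((i : Int) + 5, pvBinVal acc')
    else decodeA_go bits acc' (i + 5)
termination_by bits.length - i
decreasing_by
  have : i < bits.length := List.getElem?_eq_some_iff.mp h |>.1
  omega

def decode_literal (bits : String) : Int × Int :=
  decodeA_go bits.toList [] 0

-- ===== PORT B =====
-- B's first pass: j = 0; while bits[j] == '1': j += 5  (IndexError = none, excluded by Pre_).
def decodeB_findJ (bits : List Char) (j : Nat) : Option Nat :=
  match h : bits[j]? with
  | none => none
  | some c => if c = '1' then decodeB_findJ bits (j + 5) else some j
termination_by bits.length - j
decreasing_by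
  have : j < bits.length := List.getElem?_eq_some_iff.mp h |>.1
  omega

-- B's second pass: ''.join(bits[k+1:k+5] for k in range(0, j+1, 5)).
def decodeB_payload (bits : List Char) (j : Nat) : List Char :=
  (PySem.List.pyRange 0 ((j : Int) + 1) 5).flatMap
    (fun k => PySem.List.slice bits (some (k + 1)) (some (k + 5)))

def decode_literal_alt (bits : String) : Int × Int :=
  match decodeB_findJ bits.toList 0 with
  | none => (0, 0)
  | some j => ((j : Int) + 5, pvBinVal (decodeB_payload bits.toList j))

-- ===== PRECONDITION & SPEC =====
-- Pre_ = A returns normally AND the consumed prefix is a well-formed bit-string literal: leader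
-- bits are exactly '1' … then '0', payload positions are '0'/'1', and the payload is non-empty.
-- It excludes inputs where A raises (unterminated leader chain gives IndexError; empty or
-- unparsable payload gives ValueError) and the inputs with non-bit characters inside the consumed
-- prefix on which A still returns (underscore-tolerant int parsing; any leader other than the zero
-- bit makes A continue) — artefacts of A's implementation that a natural reading does not follow.
def Pre_decode_literal (bits : String) : Prop :=
  ∃ m < bits.toList.length,
    bits.toList.getD (5 * m) '1' = '0' ∧
    (∀ k < m, bits.toList.getD (5 * k) '0' = '1') ∧
    (∀ p < bits.toList.length, p < 5 * m + 5 → p % 5 ≠ 0 →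
      bits.toList.getD p ' ' = '0' ∨ bits.toList.getD p ' ' = '1') ∧
    (1 ≤ m ∨ 2 ≤ bits.toList.length)
instance (bits : String) : Decidable (Pre_decode_literal bits) := by unfold Pre_decode_literal; infer_instance
def pvWitness_decode_literal : String := "01011"

def Spec_decode_literal (bits : String) (out : Int × Int) : Prop := out = decode_literal_alt bits
instance (bits : String) (out : Int × Int) : Decidable (Spec_decode_literal bits out) := by unfold Spec_decode_literal; infer_instance

-- ===== CLAIM (what is proved, stated in full; the proofs are below) =====
def Claim_equal_decode_literal : Prop := ∀ (bits : String), Dom_decode_literal bits → Pre_decode_literal bits → Spec_decode_literal bits (decode_literal bits)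

-- ===== LEMMAS AND PROOFS =====

-- one-step unfolding equations for the loops (Pre_ rules out the IndexError branches)
theorem decodeA_go_some (l : List Char) (acc : List Char) (i : Nat) (c : Char) (h : l[i]? = some c) :
    decodeA_go l acc i =
      if c = '0' then ((i : Int) + 5, pvBinVal (acc ++ (l.drop (i + 1)).take 4))
      else decodeA_go l (acc ++ (l.drop (i + 1)).take 4) (i + 5) := by
  conv_lhs => rw [decodeA_go]
  split
  · rename_i heq
    rw [h] at heq
    cases heq
  · rename_i c2 heq
    rw [h] at heq
    cases heq
    rfl

theorem decodeB_findJ_some (l : List Char) (j : Nat) (c : Char) (h : l[j]? = some c) :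
    decodeB_findJ l j = if c = '1' then decodeB_findJ l (j + 5) else some j := by
  conv_lhs => rw [decodeB_findJ]
  split
  · rename_i heq
    rw [h] at heq
    cases heq
  · rename_i c2 heq
    rw [h] at heq
    cases heq
    rfl

-- induction forms for a step-5 range
theorem pyRange5_nil (a b : Int) (h : b ≤ a) : PySem.List.pyRange a b 5 = [] := by
  rw [PySem.List.pyRange_of_pos a b (by norm_num)]
  simp [if_neg (not_lt.mpr h)]

theorem pyRange5_cons (a b : Int) (h : a < b) :
    PySem.List.pyRange a b 5 = a :: PySem.List.pyRange (a + 5) b 5 := by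
  rw [PySem.List.pyRange_of_pos a b (by norm_num),
      PySem.List.pyRange_of_pos (a + 5) b (by norm_num)]
  have hcnt : (if a < b then ((b - a + 5 - 1) / 5).toNat else 0)
      = (if a + 5 < b then ((b - (a + 5) + 5 - 1) / 5).toNat else 0) + 1 := by
    rw [if_pos h]
    by_cases h5 : a + 5 < b
    · rw [if_pos h5]
      omega
    · rw [if_neg h5]
      omega
  rw [hcnt, List.range_succ_eq_map]
  simp only [List.map_cons, List.map_map]
  congr 1
  · simp
  · apply List.map_congr_left
    intro k _
    simp only [Function.comp_apply, Nat.succ_eq_add_one]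
    push_cast
    ring

-- Python slice bits[i+1:i+5] is take-4-after-drop
theorem slice_seg (l : List Char) (i : Nat) :
    PySem.List.slice l (some ((i : Int) + 1)) (some ((i : Int) + 5))
      = (l.drop (i + 1)).take 4 := by
  have h1 : ((i : Int) + 1) = ((i + 1 : Nat) : Int) := by push_cast; ring
  have h5 : ((i : Int) + 5) = ((i + 1 : Nat) : Int) + ((4 : Nat) : Int) := by push_cast; ring
  rw [h1, h5, PySem.List.slice_natCast_add]

-- B's leader scan lands on the terminating group 5*m when the leaders k..m-1 are '1' and m is '0'
theorem B_run (l : List Char) (m k : Nat) (hm : 5 * m < l.length)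
    (h0 : l.getD (5 * m) '1' = '0')
    (hl : ∀ t, k ≤ t → t < m → l.getD (5 * t) '0' = '1') (hk : k ≤ m) :
    decodeB_findJ l (5 * k) = some (5 * m) := by
  have hklen : 5 * k < l.length := by omega
  rw [decodeB_findJ_some l (5 * k) l[5 * k] (List.getElem?_eq_getElem hklen)]
  rcases Nat.eq_or_lt_of_le hk with h | h
  · subst h
    rw [List.getD_eq_getElem l '1' hm] at h0
    rw [if_neg (by rw [h0]; decide)]
  · have h1 : l[5 * k] = '1' := by
      have := hl k (le_refl k) h
      rwa [List.getD_eq_getElem l '0' hklen] at this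
    rw [if_pos h1, show 5 * k + 5 = 5 * (k + 1) from by ring]
    exact B_run l m (k + 1) hm h0 (fun t ht1 ht2 => hl t (by omega) ht2) h
termination_by m - k

-- A's fused loop, started at group k, yields (5m+5, payload of groups k..m) under the same leaders
theorem A_run (l : List Char) (m k : Nat) (acc : List Char) (hm : 5 * m < l.length)
    (h0 : l.getD (5 * m) '1' = '0')
    (hl : ∀ t, k ≤ t → t < m → l.getD (5 * t) '0' = '1') (hk : k ≤ m) :
    decodeA_go l acc (5 * k) =
      (((5 * m : Nat) : Int) + 5,
       pvBinVal (acc ++ (PySem.List.pyRange ((5 * k : Nat) : Int) (((5 * m : Nat) : Int) + 1) 5).flatMap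
         (fun p => PySem.List.slice l (some (p + 1)) (some (p + 5))))) := by
  have hklen : 5 * k < l.length := by omega
  rw [decodeA_go_some l acc (5 * k) l[5 * k] (List.getElem?_eq_getElem hklen)]
  rcases Nat.eq_or_lt_of_le hk with h | h
  · subst h
    rw [List.getD_eq_getElem l '1' hm] at h0
    rw [if_pos h0]
    rw [pyRange5_cons ((5 * k : Nat) : Int) (((5 * k : Nat) : Int) + 1) (by omega)]
    rw [pyRange5_nil (((5 * k : Nat) : Int) + 5) (((5 * k : Nat) : Int) + 1) (by omega)]
    have hs := slice_seg l (5 * k)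
    push_cast at hs ⊢
    simp [hs]
  · have h1 : l[5 * k] = '1' := by
      have := hl k (le_refl k) h
      rwa [List.getD_eq_getElem l '0' hklen] at this
    rw [if_neg (by rw [h1]; decide)]
    rw [show 5 * k + 5 = 5 * (k + 1) from by ring]
    rw [A_run l m (k + 1) _ hm h0 (fun t ht1 ht2 => hl t (by omega) ht2) h]
    have hlt : ((5 * k : Nat) : Int) < ((5 * m : Nat) : Int) + 1 := by
      have : 5 * k < 5 * m := by omega
      exact_mod_cast by omega
    rw [pyRange5_cons ((5 * k : Nat) : Int) (((5 * m : Nat) : Int) + 1) hlt]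
    have hcast : ((5 * k : Nat) : Int) + 5 = ((5 * (k + 1) : Nat) : Int) := by push_cast; ring
    rw [hcast]
    simp only [List.flatMap_cons, List.append_assoc, slice_seg]
termination_by m - k

-- ===== VERDICT (by name: the statement is the Claim_ definition above) =====
theorem decode_literal_spec : Claim_equal_decode_literal := by
  intro bits _ hpre
  obtain ⟨m, _, h0, hl, _, _⟩ := hpre
  have hm : 5 * m < bits.toList.length := by
    by_contra hge
    rw [List.getD_eq_default _ _ (by omega)] at h0
    exact absurd h0 (by decide)
  have hl' : ∀ t, 0 ≤ t → t < m → bits.toList.getD (5 * t) '0' = '1' :=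
    fun t _ ht => hl t ht
  unfold Spec_decode_literal decode_literal decode_literal_alt decodeB_payload
  have hB := B_run bits.toList m 0 hm h0 hl' (Nat.zero_le m)
  have hA := A_run bits.toList m 0 [] hm h0 hl' (Nat.zero_le m)
  rw [show (0 : Nat) = 5 * 0 from rfl] at *
  rw [hA, hB]
  push_cast
  norm_num
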